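-- pv_equiv track=rewrite | github.com/Himaja63/cp_problems | 09-shortenlongruns-Python/shortenlongruns.py | shortenlongruns
-- ===== SOURCE A (Python) =====
-- def lookandsay(a):
-- 	# Your code goes here
-- 	l = []
-- 	l1 = []
-- 	if len(a) == 0:
-- 	    return l
-- 	else:
-- 	    i = 0
-- 	    j = 0
-- 	    c = 0
-- 	    l = a
-- 	    while(i < len(a) and j < len(l)):
-- 	        if(a[i] == l[j]):
-- 	            c = c+1
-- 	            j = j + 1
-- 	        else:
-- 	            t = (c,a[i])
-- 	            l1.append(t)
-- 	            i = j
-- 	            c = 0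
-- 	    else:
-- 	        t = (c,a[i])
-- 	        l1.append(t)
-- 	    return l1
--
-- def shortenlongruns(L, k):
-- 	# Your code goes here
-- 	l = []
-- 	x = lookandsay(L)
-- 	for i in range(len(x)):
-- 		y = x[i]
-- 		if (y[0] > 1 and k <= y[0]):
-- 			for i in range(k-1):
-- 				l.append(y[1])
-- 		else:
-- 			for j in range(y[0]):
-- 				l.append(y[1])
-- 	return l
-- ===== SOURCE B (Python) =====
-- def shortenlongruns(L, k):
--     if not L:
--         return []
--     out = []
--     ch = L[0]
--     cnt = 1
--     for x in L[1:]: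
--         if x == ch:
--             cnt += 1
--         else:
--             out += [ch] * (k - 1 if cnt > 1 and k <= cnt else cnt)
--             ch = x
--             cnt = 1
--     out += [ch] * (k - 1 if cnt > 1 and k <= cnt else cnt)
--     return out
-- ===== Notes on version B (the rewrite author's own statement) =====
-- stated objective: simpler
-- what changed: Replaces the two-phase pipeline (a two-index while-loop run-length encoder producing (count,value) pairs, then an index-based pass expanding each pair with inner range loops) by one self-contained single pass that maintains the current run's value and count and flushes each finished run via list multiplication.
import Mathlib
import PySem

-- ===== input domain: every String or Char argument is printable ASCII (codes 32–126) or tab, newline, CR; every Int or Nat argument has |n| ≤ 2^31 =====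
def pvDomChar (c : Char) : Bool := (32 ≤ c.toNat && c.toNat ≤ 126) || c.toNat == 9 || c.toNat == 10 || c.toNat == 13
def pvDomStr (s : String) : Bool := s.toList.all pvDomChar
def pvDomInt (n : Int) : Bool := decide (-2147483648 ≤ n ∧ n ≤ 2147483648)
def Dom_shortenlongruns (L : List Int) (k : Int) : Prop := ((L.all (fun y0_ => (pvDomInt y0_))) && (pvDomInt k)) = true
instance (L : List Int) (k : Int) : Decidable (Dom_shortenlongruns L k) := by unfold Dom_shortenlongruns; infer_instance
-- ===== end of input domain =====

-- B replaces A's two-phase pipeline (while-loop run-length encoder, then an index pass expanding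
-- each (count,value) pair with inner range loops) by one self-contained single pass; objective: simpler.

-- ===== PORT A =====
-- A's while-loop over indices i, j (Python sets l = a, so l[j] is a[j]; both indices stay in
-- range whenever read, so getD never defaults). The loop always terminates in Python (j advances
-- on a match, i jumps forward to j on a mismatch); here it is made structural with a fuel counter
-- that is provably sufficient — the fuel guard only makes the same computation total.
def lookandsayLoop (a : List Int) (fuel : Nat) (i j : Nat) (c : Int)
    (l1 : List (Int × Int)) : List (Int × Int) :=
  match fuel with
  | 0 => l1 ++ [(c, a.getD i 0)]
  | fuel + 1 =>
    if i < a.length ∧ j < a.length then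
      if a.getD i 0 = a.getD j 0 then
        lookandsayLoop a fuel i (j + 1) (c + 1) l1
      else
        lookandsayLoop a fuel j j 0 (l1 ++ [(c, a.getD i 0)])
    else
      -- Python's while-else clause (the loop never exits via break)
      l1 ++ [(c, a.getD i 0)]

def lookandsay (a : List Int) : List (Int × Int) :=
  if a.length = 0 then [] else lookandsayLoop a (2 * a.length + 2) 0 0 0 []

def shortenlongruns (L : List Int) (k : Int) : List Int :=
  (lookandsay L).foldl
    (fun l y =>
      if y.1 > 1 ∧ k ≤ y.1 then
        (PySem.List.pyRange 0 (k - 1) 1).foldl (fun l _ => l ++ [y.2]) l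
      else
        (PySem.List.pyRange 0 y.1 1).foldl (fun l _ => l ++ [y.2]) l)
    []

-- ===== PORT B =====
-- '[ch] * copies' from Source B
def altFlush (ch : Int) (cnt : Int) (k : Int) : List Int :=
  PySem.List.pyRepeat [ch] (if cnt > 1 ∧ k ≤ cnt then k - 1 else cnt)

def altLoop (k : Int) (ch : Int) (cnt : Int) (rest : List Int) (out : List Int) : List Int :=
  match rest with
  | [] => out ++ altFlush ch cnt k
  | x :: xs =>
    if x = ch then altLoop k ch (cnt + 1) xs out
    else altLoop k x 1 xs (out ++ altFlush ch cnt k)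

def shortenlongruns_alt (L : List Int) (k : Int) : List Int :=
  match L with
  | [] => []
  | x :: xs => altLoop k x 1 xs []

-- ===== PRECONDITION & SPEC =====
def Spec_shortenlongruns (L : List Int) (k : Int) (out : List Int) : Prop := out = shortenlongruns_alt L k
instance (L : List Int) (k : Int) (out : List Int) : Decidable (Spec_shortenlongruns L k out) := by unfold Spec_shortenlongruns; infer_instance

-- ===== CLAIM (what is proved, stated in full; the proofs are below) =====
def Claim_equal_shortenlongruns : Prop := ∀ (L : List Int) (k : Int), Dom_shortenlongruns L k → Spec_shortenlongruns L k (shortenlongruns L k)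

-- ===== LEMMAS AND PROOFS =====

-- canonical run accumulator both ports are proved equal to
def runsAux (ch : Int) (cnt : Int) : List Int → List (Int × Int)
  | [] => [(cnt, ch)]
  | x :: xs => if x = ch then runsAux ch (cnt + 1) xs else (cnt, ch) :: runsAux x 1 xs

theorem foldl_append_const {α β : Type} (v : α) :
    ∀ (xs : List β) (l : List α),
      xs.foldl (fun l _ => l ++ [v]) l = l ++ List.replicate xs.length v := by
  intro xs
  induction xs with
  | nil => intro l; simp
  | cons x xs ih =>
    intro l
    simp only [List.foldl_cons, ih, List.length_cons, List.replicate_succ]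
    simp

theorem A_loop_spec (a : List Int) :
    ∀ (fuel i j : Nat) (c : Int) (l1 : List (Int × Int)),
      i < a.length → i ≤ j → j ≤ a.length →
      c = ((j - i : Nat) : Int) →
      2 * a.length - i - j < fuel →
      lookandsayLoop a fuel i j c l1 = l1 ++ runsAux (a.getD i 0) c (a.drop j) := by
  intro fuel
  induction fuel with
  | zero => intro i j c l1 hi hij hj hc hfuel; omega
  | succ fuel ih =>
    intro i j c l1 hi hij hj hc hfuel
    by_cases hjlen : j < a.length
    · have hd : a.drop j = a.getD j 0 :: a.drop (j + 1) := by
        rw [List.getD_eq_getElem a 0 hjlen, List.drop_eq_getElem_cons hjlen]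
      by_cases heq : a.getD i 0 = a.getD j 0
      · rw [lookandsayLoop, if_pos ⟨hi, hjlen⟩, if_pos heq,
          ih i (j + 1) (c + 1) l1 hi (by omega) (by omega) (by omega) (by omega)]
        conv_rhs => rw [hd, runsAux, if_pos heq.symm]
      · have hij' : i < j := by
          rcases Nat.lt_or_ge i j with h | h
          · exact h
          · exact absurd (by rw [(by omega : i = j)]) heq
        rw [lookandsayLoop, if_pos ⟨hi, hjlen⟩, if_neg heq,
          ih j j 0 (l1 ++ [(c, a.getD i 0)]) hjlen (le_refl j) (by omega) (by simp) (by omega)]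
        conv_lhs => rw [hd, runsAux, if_pos rfl]
        conv_rhs => rw [hd, runsAux, if_neg (fun h => heq h.symm)]
        simp [List.append_assoc]
    · have hjl : j = a.length := by omega
      rw [lookandsayLoop, if_neg (by omega), hjl, List.drop_length, runsAux]

theorem lookandsay_cons (x : Int) (xs : List Int) :
    lookandsay (x :: xs) = runsAux x 1 xs := by
  rw [lookandsay, if_neg (by simp)]
  rw [A_loop_spec (x :: xs) (2 * (x :: xs).length + 2) 0 0 0 []
      (by simp) (le_refl 0) (by simp) (by simp) (by omega)]
  simp [runsAux]

theorem A_fold_spec (k : Int) :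
    ∀ (pairs : List (Int × Int)) (init : List Int),
      pairs.foldl
        (fun l y =>
          if y.1 > 1 ∧ k ≤ y.1 then
            (PySem.List.pyRange 0 (k - 1) 1).foldl (fun l _ => l ++ [y.2]) l
          else
            (PySem.List.pyRange 0 y.1 1).foldl (fun l _ => l ++ [y.2]) l)
        init
      = init ++ pairs.flatMap (fun y => altFlush y.2 y.1 k) := by
  intro pairs
  induction pairs with
  | nil => intro init; simp
  | cons y ys ih =>
    intro init
    rw [List.foldl_cons, ih, List.flatMap_cons, ← List.append_assoc]
    congr 1
    by_cases h : y.1 > 1 ∧ k ≤ y.1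
    · rw [if_pos h, foldl_append_const, PySem.List.length_pyRange_one]
      simp [altFlush, if_pos h, PySem.List.pyRepeat_singleton]
    · rw [if_neg h, foldl_append_const, PySem.List.length_pyRange_one]
      simp [altFlush, if_neg h, PySem.List.pyRepeat_singleton]

theorem B_loop_spec (k : Int) :
    ∀ (rest : List Int) (ch cnt : Int) (out : List Int),
      altLoop k ch cnt rest out
        = out ++ (runsAux ch cnt rest).flatMap (fun y => altFlush y.2 y.1 k) := by
  intro rest
  induction rest with
  | nil => intro ch cnt out; simp [altLoop, runsAux]
  | cons x xs ih =>
    intro ch cnt out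
    rw [altLoop, runsAux]
    by_cases h : x = ch
    · rw [if_pos h, if_pos h, ih]
    · rw [if_neg h, if_neg h, ih, List.flatMap_cons, List.append_assoc]

-- ===== VERDICT (by name: the statement is the Claim_ definition above) =====
theorem shortenlongruns_spec : Claim_equal_shortenlongruns := by
  intro L k _
  unfold Spec_shortenlongruns
  match L with
  | [] => rfl
  | x :: xs =>
    rw [shortenlongruns, lookandsay_cons, A_fold_spec, shortenlongruns_alt, B_loop_spec]
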